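/- GENERATED by mk_final_copies.py from the proof of the farm's unit `start_decoder.9e` (farm:start_decoder.9e.1: Proof.lean) as the
   re-elaboration sweep compiled it — do not edit. -/
import Asan.CheckWalk
import Vorbis.Spec.Units.start_decoder_9e

/-!
  Unit `start_decoder.9e`: a child of the split of segment `.9` of start_decoder (Vorbis/Spec/StartDecoder9.lean: the cut assertion
  `In9`, the claims, `Seg9.of_parts`). The walk is the farm worker's (unit start_decoder.9, attempt 1) over the carry layer of
  Vorbis/Spec/StartDecoder1.lean (`P1.sd2_carry`, `P1.frame_carry`, `P1.layout_facts`, `P1.wmax_ok`) and the exit lemmas of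
  `Vorbis.Spec.StartDecoder.S9` (`mid_exit`, `err_exit`, `err4_exit`).
-/

open X86 X86.User Asan Vorbis Vorbis.Spec Vorbis.Spec.StartDecoder Vorbis.Spec.StartDecoder.P1 Vorbis.Spec.StartDecoder.S9

set_option maxRecDepth 4000
set_option maxHeartbeats 4000000

namespace Vorbis.Spec.start_decoder_9e

/-- **Segment `.9`, part e, THE ALLOCATION FAILS** (0x11421f … 0x11425e, stub 0x114427): the stores of `codebook_count` and of the NULL
`codebooks`, `setup_malloc` refusing (`¬ Fits`), `error(f, 3)`: exit 4, to the epilogue (`err4_exit`). -/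
theorem seg9e_fail (Lay : Layout) (hLay : Lay.hi = 0x1000000) (μ : Microarch) (hμ : UserX.MicroOK μ) (u₀ : State)
    (hcode : HasCodeNat Lay u₀ Vorbis.L.start_decoder.entry Vorbis.Code.code_start_decoder.nat Vorbis.L.start_decoder.size)
    (h_err : ∀ (others : List Obj) (frames : List (Nat × FrameLayout)),
      Calls Lay μ Vorbis.WayInv (Vorbis.conv u₀) Vorbis.L.error.entry (Vorbis.Spec.error.spec others frames))
    (h_st4 : Asan.SmallCheck Lay μ Vorbis.WayInv (Vorbis.CodeOK u₀) [.rax, .rcx, .rdx] 4 Vorbis.L.__asan_store4_noabort.entry)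
    (h_sm : ∀ (others : List Obj) (frames : List (Nat × FrameLayout)) (A : Arena),
      Calls Lay μ Vorbis.WayInv (Vorbis.conv u₀) Vorbis.L.setup_malloc.entry (Vorbis.Spec.setup_malloc.spec others frames A))
    (h_st8 : Asan.SmallCheck Lay μ Vorbis.WayInv (Vorbis.CodeOK u₀) [.rax, .rcx, .rdx] 8 Vorbis.L.__asan_store8_noabort.entry)
    (g : Ghost) (A : Arena × List Obj) (v : State) (n : Nat) (hb : In9 u₀ g Vorbis.L.start_decoder.cut78 A v)
    (hn : n < 256) (hrax : v.reg .rax = UInt64.ofNat n) (hfit : ¬ A.1.Fits (2120 * (n + 1))) :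
    ReachVia Lay μ WayInv v (fun w => AtC1 u₀ g w ∨ AtERR u₀ g w) := by
  have he := hb.frame.entry
  v_entry he
  simp only [depth] at he_room he_stack
  have hlay := layout_facts hb.frame hb.hand hb.sd
  have eRA : g.RA = (g.e.reg .rsp).toNat := rfl
  have ef : g.f = (g.e.reg .rdi).toNat := rfl
  rw [eRA, ef] at hlay
  obtain ⟨hRA, hR8, _, _, hfstack, hflo, hfhi, hflog, hfcrc, hfout, hAstack, hAcrc, hAhi, hAlo⟩ := hlay
  have w_rip := hb.frame.rip
  have w_rsp : v.reg .rsp = g.e.reg .rsp - 1480 := by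
    rw [hb.frame.rsp]
    apply UInt64.toNat_inj.mp
    rw [toNat_addr _ (by omega)]
    u_omega
  have w_rbp : v.reg .rbp = g.e.reg .rdi := by
    rw [hb.rbp]
    exact addr_toNat _
  have hRw : g.e.reg .rsp - 1480 = addr g.R := by
    rw [← w_rsp]
    exact hb.frame.rsp
  have c_rsp := w_rsp
  have c_rbp := w_rbp
  have w_eq : Mem.EqOn Vorbis.L.textLo Vorbis.L.textHi u₀.mem v.mem := hb.frame.code
  have hdf : v.flags .df = false := (show abiInv _ from hb.frame.inv).1
  have hmx : v.mxcsr &&& 0x1F80 = 0x1F80 := (show abiInv _ from hb.frame.inv).2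
  have hsse := Vorbis.sseOK_of_abiInv hb.frame.inv
  have henvR : ReaderEnv A.2 g.frames' (g.Blk A) g.len g.f := readerEnv hb.hand hb.sd.env.live
  have hobjL : LiveIn A.2 g.frames' g.f Off.sizeof.stb_vorbis := hb.hand.obj.mono (sub_frames' g A)
  have w_rax := hrax
  have hsm' := h_sm A.2 g.frames' A.1
  have herr' := h_err A.2 g.frames'
  u_walk hcode [hμ.vendor] until [Vorbis.L.start_decoder.cut4] span [Vorbis.L.textLo, Vorbis.L.textHi] side (v_side)
  case check_11422a =>
    -- the store `f->codebook_count = …`: inside `*f`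
    have hun : ShadowUntouched v.mem s_11422a.mem := by v_untouched
    refine hobjL.accSmall hb.frame.shadow hun _ 4 (by decide) ?_ ?_
    · rw [ef]
      u_omega
    · rw [ef]
      simp only [Vorbis.Off.sizeof.stb_vorbis]
      u_omega
  case call_inv =>
    v_inv
  case pre_114240 =>
    -- setup_malloc(f, 2120 · count): the arena layer, after the store of `codebook_count`
    have hun : ShadowUntouched v.mem s_114240.mem := by v_untouched
    have hrsp8 : (s_114240.reg .rsp).toNat + 8 = g.R := by
      rw [w_rsp]
      u_omega
    refine ⟨⟨?_, hb.frame.offText⟩, ?_, ?_, hb.hand.arenaText⟩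
    · rw [hrsp8]
      exact hb.frame.shadow.untouched hun
    · rw [w_rdi, ← ef]
      exact hb.sd.env.live _ hb.sd.bits.OB1
    · rw [w_rdi, ← ef]
      have hs : Mem.SameExcept
          [⟨(g.e.reg .rsp).toNat - 1888, (g.e.reg .rsp).toNat - 1480⟩,
           ⟨(g.e.reg .rdi).toNat + 160, (g.e.reg .rdi).toNat + 164⟩] v.mem s_114240.mem := by
        rw [w_mem]
        u_same
      refine ArenaOK.transfer hb.sd.arena (ObjEq.of_sameExcept hs ?_ ?_)
      · intro w hw
        simp only [ArenaFields.wins, List.mem_cons, List.mem_nil_iff, or_false] at hw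
        subst hw
        simp only []
        omega
      · intro w hw s hsp
        simp only [ArenaFields.wins, List.mem_cons, List.mem_nil_iff, or_false] at hw hsp
        subst hw
        rcases hsp with rfl | rfl
        · simp only []
          omega
        · simp only []
          omega
  -- after setup_malloc (0x114245)
  v_after_call w_rsp_114240 w_mem_114240
  simp only [w_rdi_114240] at w_same
  have hsz : (s_114240.reg .rsi).toNat % 2 ^ 32 = 2120 * (n + 1) := by
    rw [w_rsi_114240, sz_toNat n hn]
    omega
  rw [hsz] at w_same
  obtain ⟨hp1, hp2⟩ := w_post
  rw [hsz, w_rdi_114240, ← ef] at hp1 hp2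
  have hbnd := (show ArenaOK A.1 A.2 v.mem g.f from hb.sd.arena).bounds
  -- the allocation failed: rax = 0, the arena and the shadow as they were
  obtain ⟨w_rax, harena1, hun_c, _⟩ := hp2 hfit
  have hunA : ShadowUntouched v.mem s_114240.mem := by
    rw [w_mem_114240]
    v_untouched
  have hun1 : ShadowUntouched v.mem s_114240r.mem :=
    fun a h1 h2 => (hun_c a h1 h2).trans (hunA a h1 h2)
  have hlt : (g.e.reg Reg.rsp - 1488).toNat + 8 ≤ 0xC00000 := by u_omega
  have hS1 : Mem.SameExcept
      [⟨(g.e.reg .rsp).toNat - 1888, (g.e.reg .rsp).toNat - 1480⟩,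
         ⟨(g.e.reg .rdi).toNat + 8, (g.e.reg .rdi).toNat + 12⟩,
         ⟨(g.e.reg .rdi).toNat + 128, (g.e.reg .rdi).toNat + 132⟩,
         ⟨(g.e.reg .rdi).toNat + 136, (g.e.reg .rdi).toNat + 144⟩,
         ⟨(g.e.reg .rdi).toNat + 160, (g.e.reg .rdi).toNat + 176⟩,
         shadowSpan (A.1.B + A.1.S + 32) (A.1.B + A.1.S + 32 + 2120 * (n + 1))] v.mem s_114240r.mem := by
    refine Vorbis.Spec.Reader.sameExcept_through_callee ?_ w_same ?_
    · u_same
    · simp only [List.forall_mem_cons, List.not_mem_nil, false_imp_iff, implies_true, and_true, X86.User.inSpans_cons,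
        X86.User.inSpans_nil, or_false, shadowSpan]
      repeat' apply And.intro
      all_goals u_omega
  u_walk hcode [hμ.vendor] until [Vorbis.L.start_decoder.cut4] span [Vorbis.L.textLo, Vorbis.L.textHi] side (v_side)
  case check_11424f =>
    -- the store `f->codebooks = NULL`: inside `*f`
    have hun' : ShadowUntouched v.mem s_11424f.mem := by
      rw [w_mem]
      exact untouched_write hun1 _ 8 _ hlt
    refine hobjL.accSmall hb.frame.shadow hun' _ 8 (by decide) ?_ ?_
    · rw [ef]
      u_omega
    · rw [ef]
      simp only [Vorbis.Off.sizeof.stb_vorbis]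
      u_omega
  case call_inv =>
    v_inv
  case pre_11442f =>
    -- error(f, 3)
    have hlt2 : (g.e.reg Reg.rdi + 168).toNat + 8 ≤ 0xC00000 := by u_omega
    have hun' : ShadowUntouched v.mem s_11442f.mem := by
      rw [w_mem]
      exact untouched_write (untouched_write (untouched_write hun1 _ 8 _ hlt) _ 8 _ hlt2) _ 8 _ hlt
    have hrsp8 : (s_11442f.reg .rsp).toNat + 8 = g.R := by
      rw [w_rsp]
      u_omega
    refine ⟨⟨?_, hb.frame.offText⟩, ?_⟩
    · rw [hrsp8]
      exact hb.frame.shadow.untouched hun'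
    · rw [w_rdi, ← ef]
      exact hobjL
  -- after error (0x114434)
  have hlt2 : (g.e.reg Reg.rdi + 168).toNat + 8 ≤ 0xC00000 := by u_omega
  have hunB : ShadowUntouched v.mem s_11442f.mem := by
    rw [w_mem_11442f]
    exact untouched_write (untouched_write (untouched_write hun1 _ 8 _ hlt) _ 8 _ hlt2) _ 8 _ hlt
  have hcb0 : s_11442f.mem.readLE (g.e.reg Reg.rdi + 168) 8 = 0 := by
    rw [w_mem_11442f]
    u_read
  v_after_call w_rsp_11442f w_mem_11442f
  simp only [w_rdi_11442f] at w_same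
  have hcbF : s_11442fr.mem.readLE (g.e.reg Reg.rdi + 168) 8 = 0 := by
    rw [w_same.readLE (g.e.reg Reg.rdi + 168) 8 (by u_omega) ?_]
    · rw [← w_mem_11442f]
      exact hcb0
    · simp only [List.forall_mem_cons, List.not_mem_nil, false_imp_iff, implies_true, and_true]
      constructor
      · u_omega
      · u_omega
  have hS2 : Mem.SameExcept
      [⟨(g.e.reg .rsp).toNat - 1888, (g.e.reg .rsp).toNat - 1480⟩,
         ⟨(g.e.reg .rdi).toNat + 8, (g.e.reg .rdi).toNat + 12⟩,
         ⟨(g.e.reg .rdi).toNat + 128, (g.e.reg .rdi).toNat + 132⟩,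
         ⟨(g.e.reg .rdi).toNat + 136, (g.e.reg .rdi).toNat + 144⟩,
         ⟨(g.e.reg .rdi).toNat + 160, (g.e.reg .rdi).toNat + 176⟩,
         shadowSpan (A.1.B + A.1.S + 32) (A.1.B + A.1.S + 32 + 2120 * (n + 1))] v.mem s_11442fr.mem := by
    refine Vorbis.Spec.Reader.sameExcept_through_callee ?_ w_same ?_
    · u_same
    · simp only [List.forall_mem_cons, List.not_mem_nil, false_imp_iff, implies_true, and_true, X86.User.inSpans_cons,
        X86.User.inSpans_nil, or_false, shadowSpan]
      repeat' apply And.intro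
      all_goals u_omega
  have hunF : ShadowUntouched v.mem s_11442fr.mem :=
    fun a h1 h2 => (w_post.2.1 a h1 h2).trans (hunB a h1 h2)
  have hS3 : Mem.SameExcept
      [⟨(g.e.reg .rsp).toNat - 1888, (g.e.reg .rsp).toNat - 1480⟩,
         ⟨(g.e.reg .rdi).toNat + 8, (g.e.reg .rdi).toNat + 12⟩,
         ⟨(g.e.reg .rdi).toNat + 128, (g.e.reg .rdi).toNat + 132⟩,
         ⟨(g.e.reg .rdi).toNat + 136, (g.e.reg .rdi).toNat + 144⟩,
         ⟨(g.e.reg .rdi).toNat + 160, (g.e.reg .rdi).toNat + 176⟩] v.mem s_11442fr.mem := by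
    refine sameExcept_drop_last hS2 ?_
    intro a h1 h2
    simp only [shadowSpan] at h1 h2
    exact hunF a (by omega) (by omega)
  have hQ : Mem.SameExcept
      [⟨(g.e.reg .rsp).toNat - 1888, (g.e.reg .rsp).toNat - 1480⟩,
       ⟨(g.e.reg .rdi).toNat + 136, (g.e.reg .rdi).toNat + 144⟩,
       ⟨(g.e.reg .rdi).toNat + 168, (g.e.reg .rdi).toNat + 176⟩] s_114240r.mem s_11442fr.mem := by
    refine Vorbis.Spec.Reader.sameExcept_through_callee ?_ w_same ?_
    · u_same
    · simp only [List.forall_mem_cons, List.not_mem_nil, false_imp_iff, implies_true, and_true, X86.User.inSpans_cons,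
        X86.User.inSpans_nil, or_false]
      repeat' apply And.intro
      all_goals u_omega
  have harenaF : ArenaOK A.1 A.2 s_11442fr.mem g.f := by
    refine ArenaOK.transfer harena1 (ObjEq.of_sameExcept hQ ?_ ?_)
    · intro w hw
      simp only [ArenaFields.wins, List.mem_cons, List.mem_nil_iff, or_false] at hw
      subst hw
      simp only []
      omega
    · intro w hw s hsp
      simp only [ArenaFields.wins, List.mem_cons, List.mem_nil_iff, or_false] at hw hsp
      subst hw
      rcases hsp with rfl | rfl | rfl
      · simp only []
        omega
      · simp only []
        omega
      · simp only []
        omega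
  have hnullF : stb_vorbis.codebooks s_11442fr.mem g.f = 0 := by
    have ea : g.e.reg Reg.rdi + 168 = addr (g.f + 168) := by
      rw [ef, ← addr_add_lit, addr_toNat]
    simp only [vacc, voff]
    unfold Mem.u64
    rw [← ea]
    exact hcbF
  have w_rax : s_11442fr.reg .rax = 0 := w_post.1
  u_walk hcode [hμ.vendor] until [Vorbis.L.start_decoder.cut4] span [Vorbis.L.textLo, Vorbis.L.textHi] side (v_side)
  refine ReachVia.done (Or.inr ?_)
  have hinvE : abiInv s_114434 := by v_inv
  have hraxE : (s_114434.reg .rax).toNat % 2 ^ 32 = 0 := by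
    rw [w_rax]
    rfl
  refine err4_exit hb (s := s_114434) (by rw [w_mem]; exact hS3) ?_ ?_ (by rw [w_mem]; exact hunF)
    (by rw [w_mem]; exact harenaF) (by rw [w_mem]; exact hnullF) w_rip (by rw [w_rsp]; exact hRw) w_eq hinvE hraxE
  · intro w hw
    simp only [List.mem_cons, List.mem_nil_iff, or_false] at hw
    unfold LateWin
    rw [ef]
    rcases hw with rfl | rfl | rfl | rfl | rfl
    all_goals simp only []
    all_goals omega
  · intro w hw
    simp only [List.mem_cons, List.mem_nil_iff, or_false] at hw
    unfold FrameWin2 FrameWin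
    simp only [depth]
    rw [eRA, ef]
    rcases hw with rfl | rfl | rfl | rfl | rfl
    all_goals simp only []
    all_goals omega

end Vorbis.Spec.start_decoder_9e

/-- **Unit `start_decoder.9e`** (0x11421f … 0x11425e + the stub 0x114427, the request is refused): the walk `seg9e_fail` above, at
`n` = the value of rax. -/
theorem Vorbis.Spec.Worked.start_decoder_9e_ok : Vorbis.Spec.start_decoder_9e.Statement := by
  intro Lay hLay μ hμ u₀ hcode h_error h_asan_store4_noabort h_setup_malloc h_asan_store8_noabort g A v hb hlt hnofit
  exact Vorbis.Spec.start_decoder_9e.seg9e_fail Lay hLay μ hμ u₀ hcode h_error h_asan_store4_noabort h_setup_malloc h_asan_store8_noabort g A v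
    (v.reg .rax).toNat hb hlt (UInt64.ofNat_toNat).symm hnofit
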